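-- pv_equiv track=rewrite | github.com/eddiesung111/LeetCode | Algorithm/1981. Minimize the Difference Between Target and Chosen Elements.py | minimizeTheDifference
-- ===== SOURCE A (Python) =====
-- from typing import List
--
-- def minimizeTheDifference(mat: List[List[int]], target: int) -> int:
--     # Time = O(mn)
--     # Space = O(mn)
--     '''
--     seen record the number sum we have seen before.
--     The position of bit means the sum.
--     eg.
--     00010, it means 1
--     0100010 it means 1 and 5
--     Afterwards, we push the bit backwards, which represents we add the value.
--     00010 << 3 = 010000 [push backward 3 digits]
--     Thus, it represents 1 + 3 = 4.
--     Therefore, we use seen to record all the sum we have seen on last row.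
--     new_seen = new_seen | (seen << num), we add each num with seen and record it with OR[|] operation
--     Then, we get our new_seen, ie. seen = new_seen.
--     We now renew the new_seen and continue the above procedures.
--     Then, find the minimum absolute difference.
--     '''
--     seen = 1
--     for row in mat:
--         new_seen = 0
--         for num in row:
--             new_seen = new_seen | (seen << num)
--         seen = new_seen
--     for i in range(target + 1):
--         if seen & (1 << target + i | 1 << target - i): # != 0
--             return i
--     for i in range(target + 1, 70 * 70 + 1):
--         if seen & (1 << target + i): # != 0
--             return i
-- ===== SOURCE B (Python) =====
-- from typing import List
--
-- def minimizeTheDifference(mat: List[List[int]], target: int) -> int: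
--     # Transposed bitset DP: build each row's value mask once and shift it by every
--     # reachable sum (instead of shifting the sum bitset by every row value), then
--     # read the sums off the final bitset and take a single min-reduction over
--     # abs(s - target) (instead of two outward bit scans from target).
--     seen = 1
--     for row in mat:
--         mask = 0
--         for num in row:
--             mask |= 1 << num
--         new = 0
--         s = seen
--         while s:
--             num = s.bit_length() - 1
--             new |= mask << num
--             s -= 1 << num
--         seen = new
--     sums = []
--     s = seen
--     while s:
--         num = s.bit_length() - 1
--         sums.append(num)
--         s -= 1 << num
--     return min(abs(s - target) for s in sums)
-- ===== Notes on version B (the rewrite author's own statement) =====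
-- stated objective: alternative
-- what changed: B transposes the bitset DP: it builds each row's value mask once and shifts that mask by every reachable sum read off the sum bitset (A shifts the sum bitset by every row element), then extracts all sums from the final bitset and takes a single min-reduction over abs(s - target) instead of A's two outward early-return bit scans from target.
-- outside the precondition, e.g. on minimizeTheDifference([[5000]], 0): A returns None, B returns 5000; on minimizeTheDifference([[]], 3): A returns None, B raises ValueError
import Mathlib
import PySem

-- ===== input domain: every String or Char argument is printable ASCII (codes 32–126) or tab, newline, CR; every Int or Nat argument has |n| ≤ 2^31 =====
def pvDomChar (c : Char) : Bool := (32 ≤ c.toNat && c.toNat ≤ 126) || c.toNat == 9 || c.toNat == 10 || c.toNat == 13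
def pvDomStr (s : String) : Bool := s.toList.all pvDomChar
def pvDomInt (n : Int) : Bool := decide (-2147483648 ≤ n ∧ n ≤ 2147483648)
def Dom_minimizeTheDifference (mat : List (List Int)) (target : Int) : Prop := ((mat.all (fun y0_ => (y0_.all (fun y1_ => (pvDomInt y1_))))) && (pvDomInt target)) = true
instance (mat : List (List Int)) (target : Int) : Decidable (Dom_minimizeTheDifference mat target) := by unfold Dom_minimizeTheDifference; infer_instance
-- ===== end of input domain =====

-- B transposes A's bitset DP: it builds each row's value mask once and shifts it by every reachable
-- sum (A shifts the sum bitset by every row element), then reads the sums off the final bitset and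
-- takes one min-reduction over |s - target| instead of A's two outward early-return bit scans.

-- ===== PORT A =====
-- inner loop: new_seen = new_seen | (seen << num)
def aNewSeen (seen : Nat) (row : List Int) : Nat :=
  row.foldl (fun ns num => ns ||| (seen <<< num.toNat)) 0

-- for i in range(target + 1): if seen & (1 << target + i | 1 << target - i): return i
def aLoop1 (seen : Nat) (target : Int) (i : Int) : Option Int :=
  if _h : target + 1 ≤ i then none
  else if (seen &&& ((1 <<< (target + i).toNat) ||| (1 <<< (target - i).toNat))) != 0 then some i
  else aLoop1 seen target (i + 1)
termination_by (target + 1 - i).toNat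
decreasing_by omega

-- for i in range(target + 1, 70 * 70 + 1): if seen & (1 << target + i): return i
def aLoop2 (seen : Nat) (target : Int) (i : Int) : Int :=
  if _h : 70 * 70 + 1 ≤ i then 0  -- Python falls off the function (returns None, not an int) here; outside Pre_
  else if (seen &&& (1 <<< (target + i).toNat)) != 0 then i
  else aLoop2 seen target (i + 1)
termination_by (70 * 70 + 1 - i).toNat
decreasing_by omega

def minimizeTheDifference (mat : List (List Int)) (target : Int) : Int :=
  let seen : Nat := mat.foldl aNewSeen 1
  match aLoop1 seen target 0 with
  | some i => i
  | none => aLoop2 seen target (target + 1)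

-- ===== PORT B =====
-- mask |= 1 << num
def bRowMask (row : List Int) : Nat :=
  row.foldl (fun m num => m ||| ((1 : Nat) <<< num.toNat)) 0

-- while s: num = s.bit_length() - 1; new |= mask << num; s -= 1 << num
-- (fuel: the loop clears one set bit of s per step, so s steps always suffice)
def bSpread (mask : Nat) (fuel s new : Nat) : Nat :=
  match fuel with
  | 0 => new
  | fuel + 1 =>
    if s = 0 then new
    else
      let num := PySem.Int.bitLength (s : Int) - 1
      bSpread mask fuel (s - (1 <<< num)) (new ||| (mask <<< num))

-- while s: num = s.bit_length() - 1; sums.append(num); s -= 1 << num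
def bCollect (fuel s : Nat) : List Int :=
  match fuel with
  | 0 => []
  | fuel + 1 =>
    if s = 0 then []
    else
      let num := PySem.Int.bitLength (s : Int) - 1
      ((num : Nat) : Int) :: bCollect fuel (s - (1 <<< num))

def minimizeTheDifference_alt (mat : List (List Int)) (target : Int) : Int :=
  let seen : Nat := mat.foldl (fun seen row => bSpread (bRowMask row) seen seen 0) 1
  -- min(abs(s - target) for s in sums); Python's min raises on an empty list (outside Pre_)
  (PySem.List.min? ((bCollect seen seen).map (fun s => |s - target|)) (fun x => x)).getD 0

-- ===== PRECONDITION & SPEC =====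
-- Pre_ excludes (a) a negative target or a negative matrix entry, where A raises ValueError on a
-- negative shift; and (b) an empty row or a minimal achievable row-sum beyond target + 4900, where
-- A falls off both scan loops and returns None instead of an int.
def Pre_minimizeTheDifference (mat : List (List Int)) (target : Int) : Prop :=
  0 ≤ target ∧ (∀ row ∈ mat, row ≠ [] ∧ ∀ x ∈ row, 0 ≤ x) ∧
  (mat.map (fun r => r.foldl min (r.headD 0))).sum ≤ target + 70 * 70

instance (mat : List (List Int)) (target : Int) : Decidable (Pre_minimizeTheDifference mat target) := by
  unfold Pre_minimizeTheDifference; infer_instance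

def pvWitness_minimizeTheDifference : List (List Int) × Int := ([[1, 2], [3]], 4)

def Spec_minimizeTheDifference (mat : List (List Int)) (target : Int) (out : Int) : Prop := out = minimizeTheDifference_alt mat target
instance (mat : List (List Int)) (target : Int) (out : Int) : Decidable (Spec_minimizeTheDifference mat target out) := by unfold Spec_minimizeTheDifference; infer_instance

-- ===== CLAIM (what is proved, stated in full; the proofs are below) =====
def Claim_equal_minimizeTheDifference : Prop := ∀ (mat : List (List Int)) (target : Int), Dom_minimizeTheDifference mat target → Pre_minimizeTheDifference mat target → Spec_minimizeTheDifference mat target (minimizeTheDifference mat target)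

-- ===== LEMMAS AND PROOFS =====

-- the abstract set of reachable sums (proof-side only): one DP step over a row
def bStep (sums : List Int) (row : List Int) : List Int :=
  PySem.Set.ofList (sums.flatMap (fun s => row.map (fun num => s + num)))

-- the invariant linking a bitset to the abstract set of sums
def RelSums (seen : Nat) (S : List Int) : Prop :=
  (∀ s ∈ S, 0 ≤ s) ∧ (∀ k : Nat, seen.testBit k ↔ (k : Int) ∈ S)

theorem mem_bStep (S : List Int) (row : List Int) (y : Int) :
    y ∈ bStep S row ↔ ∃ s ∈ S, ∃ num ∈ row, y = s + num := by
  simp [bStep, PySem.Set.mem_ofList, List.mem_flatMap, List.mem_map]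
  constructor
  · rintro ⟨s, hs, num, hnum, rfl⟩; exact ⟨s, hs, num, hnum, rfl⟩
  · rintro ⟨s, hs, num, hnum, rfl⟩; exact ⟨s, hs, num, hnum, rfl⟩

theorem relSums_init : RelSums 1 (PySem.Set.ofList [0]) := by
  constructor
  · intro s hs; simp [PySem.Set.ofList] at hs; omega
  · intro k
    constructor
    · intro hb
      have : k = 0 := by
        by_contra hk
        rw [show (1:Nat) = 2^0 by rfl, Nat.testBit_two_pow] at hb
        simp at hb; omega
      simp [this, PySem.Set.ofList]
    · intro hm
      simp [PySem.Set.ofList] at hm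
      have : k = 0 := by omega
      simp [this]

theorem testBit_aNewSeen (seen : Nat) (row : List Int) (ns : Nat) (k : Nat) :
    (row.foldl (fun ns num => ns ||| (seen <<< num.toNat)) ns).testBit k ↔
      (ns.testBit k ∨ ∃ num ∈ row, num.toNat ≤ k ∧ seen.testBit (k - num.toNat)) := by
  induction row generalizing ns with
  | nil => simp
  | cons h t ih =>
    simp only [List.foldl_cons, ih, Nat.testBit_or, Nat.testBit_shiftLeft, List.mem_cons]
    constructor
    · rintro (hb | ⟨num, hnum, hle, hbit⟩)
      · rcases Bool.or_eq_true_iff.mp hb with hb | hb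
        · exact Or.inl hb
        · rcases Bool.and_eq_true_iff.mp hb with ⟨hle, hbit⟩
          exact Or.inr ⟨h, Or.inl rfl, by simpa using hle, hbit⟩
      · exact Or.inr ⟨num, Or.inr hnum, hle, hbit⟩
    · rintro (hb | ⟨num, hnum | hnum, hle, hbit⟩)
      · exact Or.inl (by simp [hb])
      · subst hnum
        exact Or.inl (by simp [hle, hbit])
      · exact Or.inr ⟨num, hnum, hle, hbit⟩

theorem relSums_step (seen : Nat) (S : List Int) (row : List Int)
    (hrow : ∀ x ∈ row, 0 ≤ x) (hrel : RelSums seen S) :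
    RelSums (aNewSeen seen row) (bStep S row) := by
  obtain ⟨hnn, hbit⟩ := hrel
  constructor
  · intro y hy
    rcases (mem_bStep S row y).mp hy with ⟨s, hs, num, hnum, rfl⟩
    have := hnn s hs; have := hrow num hnum; omega
  · intro k
    rw [mem_bStep]
    unfold aNewSeen
    rw [testBit_aNewSeen]
    simp only [Nat.zero_testBit, Bool.false_eq_true, false_or]
    constructor
    · rintro ⟨num, hnum, hle, hb⟩
      refine ⟨((k - num.toNat : Nat) : Int), (hbit _).mp hb, num, hnum, ?_⟩
      have := hrow num hnum; omega
    · rintro ⟨s, hs, num, hnum, hk⟩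
      have h0s := hnn s hs; have h0n := hrow num hnum
      refine ⟨num, hnum, by omega, ?_⟩
      have : (k - num.toNat : Nat) = s.toNat := by omega
      rw [this]
      exact (hbit _).mpr (by rwa [Int.toNat_of_nonneg h0s])

theorem relSums_foldl (mat : List (List Int)) (seen : Nat) (S : List Int)
    (hmat : ∀ row ∈ mat, ∀ x ∈ row, 0 ≤ x) (hrel : RelSums seen S) :
    RelSums (mat.foldl aNewSeen seen) (mat.foldl bStep S) := by
  induction mat generalizing seen S with
  | nil => simpa
  | cons row t ih =>
    simp only [List.foldl_cons]
    exact ih _ _ (fun r hr => hmat r (List.mem_cons_of_mem _ hr))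
      (relSums_step seen S row (hmat row (List.mem_cons_self)) hrel)

-- bounds from Python's bit_length: 2^(L-1) ≤ s < 2^(L-1) * 2 for s ≠ 0
theorem top_bounds (s : Nat) (hs : s ≠ 0) :
    2 ^ (PySem.Int.bitLength (s : Int) - 1) ≤ s ∧ s < 2 ^ (PySem.Int.bitLength (s : Int) - 1) * 2 := by
  have h1 := PySem.Int.two_pow_bitLength_le (s : Int) (by exact_mod_cast hs)
  have h2 := PySem.Int.lt_two_pow_bitLength (s : Int)
  rw [Int.natAbs_natCast] at h1 h2
  have hbl : 1 ≤ PySem.Int.bitLength (s : Int) := by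
    by_contra h
    have h0 : PySem.Int.bitLength (s : Int) = 0 := by omega
    rw [h0] at h2; simp at h2; omega
  refine ⟨h1, ?_⟩
  have : 2 ^ (PySem.Int.bitLength (s : Int) - 1) * 2 = 2 ^ PySem.Int.bitLength (s : Int) := by
    rw [← pow_succ]; congr 1; omega
  omega

theorem testBit_top (s : Nat) (hs : s ≠ 0) :
    s.testBit (PySem.Int.bitLength (s : Int) - 1) = true := by
  obtain ⟨h1, h2⟩ := top_bounds s hs
  set b := PySem.Int.bitLength (s : Int) - 1 with hb
  have hr : s - 2 ^ b < 2 ^ b := by omega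
  rw [show s = 2 ^ b + (s - 2 ^ b) by omega, Nat.testBit_two_pow_add_eq]
  rw [Nat.testBit_lt_two_pow hr]
  rfl

theorem testBit_sub_top (s : Nat) (hs : s ≠ 0) (j : Nat) :
    (s - (1 <<< (PySem.Int.bitLength (s : Int) - 1))).testBit j =
      (s.testBit j && !(j == PySem.Int.bitLength (s : Int) - 1)) := by
  obtain ⟨h1, h2⟩ := top_bounds s hs
  set b := PySem.Int.bitLength (s : Int) - 1 with hbdef
  rw [Nat.one_shiftLeft]
  have hr : s - 2 ^ b < 2 ^ b := by omega
  have hs_eq : s = 2 ^ b + (s - 2 ^ b) := by omega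
  rcases lt_trichotomy j b with hj | hj | hj
  · rw [show s.testBit j = (s - 2 ^ b).testBit j by
      conv_lhs => rw [hs_eq]
      exact Nat.testBit_two_pow_add_gt hj _]
    have : (j == b) = false := by simp; omega
    rw [this]; simp
  · subst hj
    rw [Nat.testBit_lt_two_pow hr]
    simp
  · have hsj : s.testBit j = false := by
      refine Nat.testBit_lt_two_pow ?_
      calc s < 2 ^ b * 2 := h2
        _ = 2 ^ (b + 1) := by rw [pow_succ]
        _ ≤ 2 ^ j := Nat.pow_le_pow_right (by norm_num) (by omega)
    have hrj : (s - 2 ^ b).testBit j = false := by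
      refine Nat.testBit_lt_two_pow ?_
      calc s - 2 ^ b < 2 ^ b := hr
        _ ≤ 2 ^ j := Nat.pow_le_pow_right (by norm_num) (by omega)
    rw [hsj, hrj]; rfl

theorem testBit_bSpread (mask : Nat) (fuel : Nat) : ∀ (s new k : Nat), s ≤ fuel →
    ((bSpread mask fuel s new).testBit k ↔
      (new.testBit k ∨ ∃ j, s.testBit j = true ∧ (mask <<< j).testBit k = true)) := by
  induction fuel with
  | zero =>
    intro s new k hsf
    have : s = 0 := by omega
    subst this
    simp [bSpread, Nat.zero_testBit]
  | succ fuel ih =>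
    intro s new k hsf
    by_cases hs : s = 0
    · subst hs; simp [bSpread, Nat.zero_testBit]
    · rw [show bSpread mask (fuel + 1) s new =
        bSpread mask fuel (s - (1 <<< (PySem.Int.bitLength (s : Int) - 1)))
          (new ||| (mask <<< (PySem.Int.bitLength (s : Int) - 1))) by
        conv_lhs => rw [bSpread]
        simp [hs]]
      have hpos : 1 ≤ 1 <<< (PySem.Int.bitLength (s : Int) - 1) := by
        rw [Nat.one_shiftLeft]; exact Nat.one_le_two_pow
      rw [ih _ _ k (by omega)]
      set b := PySem.Int.bitLength (s : Int) - 1 with hbdef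
      constructor
      · rintro (hb | ⟨j, hj1, hj2⟩)
        · rw [Nat.testBit_or] at hb
          rcases Bool.or_eq_true_iff.mp hb with h | h
          · exact Or.inl h
          · exact Or.inr ⟨b, testBit_top s hs, h⟩
        · rw [testBit_sub_top s hs j] at hj1
          rcases Bool.and_eq_true_iff.mp hj1 with ⟨hsj, _⟩
          exact Or.inr ⟨j, hsj, hj2⟩
      · rintro (hb | ⟨j, hj1, hj2⟩)
        · exact Or.inl (by simp [Nat.testBit_or, hb])
        · by_cases hjb : j = b
          · subst hjb
            exact Or.inl (by simp [Nat.testBit_or, hj2])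
          · refine Or.inr ⟨j, ?_, hj2⟩
            rw [testBit_sub_top s hs j, hj1]
            simp only [Bool.true_and]
            rw [← hbdef]
            simp [hjb]

theorem mem_bCollect (fuel : Nat) : ∀ (s : Nat) (x : Int), s ≤ fuel →
    (x ∈ bCollect fuel s ↔ 0 ≤ x ∧ s.testBit x.toNat = true) := by
  induction fuel with
  | zero =>
    intro s x hsf
    have : s = 0 := by omega
    subst this
    simp [bCollect, Nat.zero_testBit]
  | succ fuel ih =>
    intro s x hsf
    by_cases hs : s = 0
    · subst hs; simp [bCollect, Nat.zero_testBit]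
    · rw [show bCollect (fuel + 1) s =
        ((PySem.Int.bitLength (s : Int) - 1 : Nat) : Int) ::
          bCollect fuel (s - (1 <<< (PySem.Int.bitLength (s : Int) - 1))) by
        conv_lhs => rw [bCollect]
        simp [hs]]
      have hpos : 1 ≤ 1 <<< (PySem.Int.bitLength (s : Int) - 1) := by
        rw [Nat.one_shiftLeft]; exact Nat.one_le_two_pow
      rw [List.mem_cons, ih _ x (by omega)]
      set b := PySem.Int.bitLength (s : Int) - 1 with hbdef
      constructor
      · rintro (rfl | ⟨hx0, hbit⟩)
        · exact ⟨by positivity, by simpa using testBit_top s hs⟩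
        · rw [testBit_sub_top s hs x.toNat] at hbit
          exact ⟨hx0, (Bool.and_eq_true_iff.mp hbit).1⟩
      · rintro ⟨hx0, hbit⟩
        by_cases hxb : x.toNat = b
        · left; omega
        · right
          refine ⟨hx0, ?_⟩
          rw [testBit_sub_top s hs x.toNat, hbit]
          simp only [Bool.true_and]
          rw [← hbdef]
          simp [hxb]

theorem relB_step (seen : Nat) (S : List Int) (row : List Int)
    (hrow : ∀ x ∈ row, 0 ≤ x) (hrel : RelSums seen S) :
    RelSums (bSpread (bRowMask row) seen seen 0) (bStep S row) := by
  obtain ⟨hnn, hbit⟩ := hrel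
  have hmask : ∀ i : Nat, (bRowMask row).testBit i = true ↔ ∃ num ∈ row, num.toNat = i := by
    intro i
    unfold bRowMask
    rw [testBit_aNewSeen 1 row 0 i]
    simp only [Nat.zero_testBit, Bool.false_eq_true, false_or]
    constructor
    · rintro ⟨num, hnum, hle, hb⟩
      rw [show (1:Nat) = 2^0 by rfl, Nat.testBit_two_pow] at hb
      refine ⟨num, hnum, ?_⟩
      simp at hb; omega
    · rintro ⟨num, hnum, rfl⟩
      refine ⟨num, hnum, le_rfl, ?_⟩
      rw [Nat.sub_self]
      rfl
  constructor
  · intro y hy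
    rcases (mem_bStep S row y).mp hy with ⟨s, hs, num, hnum, rfl⟩
    have := hnn s hs; have := hrow num hnum; omega
  · intro k
    rw [mem_bStep, testBit_bSpread (bRowMask row) seen seen 0 k le_rfl]
    simp only [Nat.zero_testBit, Bool.false_eq_true, false_or]
    constructor
    · rintro ⟨j, hj, hb⟩
      rw [Nat.testBit_shiftLeft] at hb
      rcases Bool.and_eq_true_iff.mp hb with ⟨hle, hmb⟩
      have hle' : j ≤ k := by simpa using hle
      rcases (hmask _).mp hmb with ⟨num, hnum, hnk⟩
      have h0n := hrow num hnum
      refine ⟨(j : Int), (hbit j).mp hj, num, hnum, by omega⟩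
    · rintro ⟨s, hs, num, hnum, hk⟩
      have h0s := hnn s hs; have h0n := hrow num hnum
      refine ⟨s.toNat, (hbit s.toNat).mpr (by rwa [Int.toNat_of_nonneg h0s]), ?_⟩
      rw [Nat.testBit_shiftLeft]
      refine Bool.and_eq_true_iff.mpr ⟨by simp; omega, ?_⟩
      exact (hmask _).mpr ⟨num, hnum, by omega⟩

theorem relB_foldl (mat : List (List Int)) (seen : Nat) (S : List Int)
    (hmat : ∀ row ∈ mat, ∀ x ∈ row, 0 ≤ x) (hrel : RelSums seen S) :
    RelSums (mat.foldl (fun seen row => bSpread (bRowMask row) seen seen 0) seen)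
      (mat.foldl bStep S) := by
  induction mat generalizing seen S with
  | nil => simpa
  | cons row t ih =>
    simp only [List.foldl_cons]
    exact ih _ _ (fun r hr => hmat r (List.mem_cons_of_mem _ hr))
      (relB_step seen S row (hmat row (List.mem_cons_self)) hrel)

theorem rowMin_mem (r : List Int) (h : r ≠ []) : r.foldl min (r.headD 0) ∈ r := by
  match r with
  | x :: t =>
    have h1 : PySem.List.min? (x :: t) (fun y => y) = some (t.foldl min x) :=
      PySem.List.min?_id_cons ..
    have := PySem.List.min?_mem h1
    simpa [min_self] using this

theorem minRowSum_mem (mat : List (List Int)) (S : List Int) (x : Int)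
    (hx : x ∈ S) (hne : ∀ row ∈ mat, row ≠ []) :
    x + (mat.map (fun r => r.foldl min (r.headD 0))).sum ∈ mat.foldl bStep S := by
  induction mat generalizing S x with
  | nil => simpa
  | cons row t ih =>
    simp only [List.foldl_cons, List.map_cons, List.sum_cons]
    have hmem : x + row.foldl min (row.headD 0) ∈ bStep S row :=
      (mem_bStep S row _).mpr ⟨x, hx, _, rowMin_mem row (hne row List.mem_cons_self), rfl⟩
    have := ih (bStep S row) _ hmem (fun r hr => hne r (List.mem_cons_of_mem _ hr))
    rw [← add_assoc]
    exact this

-- seen & (1 << a | 1 << b) != 0  ↔  bit a or bit b is set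
theorem band_bor_shift_ne (seen a b : Nat) :
    (seen &&& ((1 <<< a) ||| (1 <<< b))) ≠ 0 ↔ seen.testBit a ∨ seen.testBit b := by
  rw [Nat.one_shiftLeft, Nat.one_shiftLeft]
  constructor
  · intro h
    obtain ⟨k, hk⟩ := Nat.exists_testBit_of_ne_zero h
    rw [Nat.testBit_and, Nat.testBit_or, Nat.testBit_two_pow, Nat.testBit_two_pow] at hk
    rcases Bool.and_eq_true_iff.mp hk with ⟨hs, hab⟩
    rcases Bool.or_eq_true_iff.mp hab with h' | h'
    · have hak : a = k := by simpa using h'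
      exact Or.inl (hak ▸ hs)
    · have hbk : b = k := by simpa using h'
      exact Or.inr (hbk ▸ hs)
  · intro h
    rcases h with h | h
    · intro h0
      have : (seen &&& (2 ^ a ||| 2 ^ b)).testBit a = true := by
        rw [Nat.testBit_and, Nat.testBit_or, Nat.testBit_two_pow]
        simp [h]
      rw [h0] at this; simp at this
    · intro h0
      have : (seen &&& (2 ^ a ||| 2 ^ b)).testBit b = true := by
        rw [Nat.testBit_and, Nat.testBit_or, Nat.testBit_two_pow]
        simp [h]
      rw [h0] at this; simp at this

theorem band_shift_ne (seen a : Nat) :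
    (seen &&& (1 <<< a)) ≠ 0 ↔ seen.testBit a := by
  rw [Nat.one_shiftLeft]
  constructor
  · intro h
    obtain ⟨k, hk⟩ := Nat.exists_testBit_of_ne_zero h
    rw [Nat.testBit_and, Nat.testBit_two_pow] at hk
    rcases Bool.and_eq_true_iff.mp hk with ⟨hs, hab⟩
    have hak : a = k := by simpa using hab
    exact hak ▸ hs
  · intro h h0
    have : (seen &&& 2 ^ a).testBit a = true := by
      rw [Nat.testBit_and, Nat.testBit_two_pow]; simp [h]
    rw [h0] at this; simp at this

-- the first loop returns the least i in [a, target] whose bit test fires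
theorem aLoop1_some (seen : Nat) (target x : Int) : ∀ (a : Int), a ≤ x → x < target + 1 →
    ((seen &&& ((1 <<< (target + x).toNat) ||| (1 <<< (target - x).toNat))) != 0) = true →
    (∀ y, a ≤ y → y < x →
      ((seen &&& ((1 <<< (target + y).toNat) ||| (1 <<< (target - y).toNat))) != 0) = false) →
    aLoop1 seen target a = some x := by
  intro a hax hxb hpx hmin
  have hn : (x - a).toNat = (x - a).toNat := rfl
  generalize hgen : (x - a).toNat = n at hn
  clear hn
  induction n generalizing a with
  | zero =>
    have hxa : x = a := by omega
    subst hxa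
    rw [aLoop1, dif_neg (by omega), if_pos hpx]
  | succ n ih =>
    rw [aLoop1, dif_neg (by omega), if_neg (by rw [hmin a le_rfl (by omega)]; simp)]
    exact ih (a + 1) (by omega) (fun y hy1 hy2 => hmin y (by omega) hy2) (by omega)

-- the first loop finds nothing when no bit test fires on [a, target]
theorem aLoop1_none (seen : Nat) (target : Int) : ∀ (a : Int),
    (∀ y, a ≤ y → y < target + 1 →
      ((seen &&& ((1 <<< (target + y).toNat) ||| (1 <<< (target - y).toNat))) != 0) = false) →
    aLoop1 seen target a = none := by
  intro a hall
  have hn : (target + 1 - a).toNat = (target + 1 - a).toNat := rfl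
  generalize hgen : (target + 1 - a).toNat = n at hn
  clear hn
  induction n generalizing a with
  | zero => rw [aLoop1, dif_pos (by omega)]
  | succ n ih =>
    by_cases ha : target + 1 ≤ a
    · rw [aLoop1, dif_pos ha]
    · rw [aLoop1, dif_neg ha, if_neg (by rw [hall a le_rfl (by omega)]; simp)]
      exact ih (a + 1) (fun y hy1 hy2 => hall y (by omega) hy2) (by omega)

-- the second loop returns the least i in [a, 4900] whose bit test fires
theorem aLoop2_eq (seen : Nat) (target x : Int) : ∀ (a : Int), a ≤ x → x < 70 * 70 + 1 →
    ((seen &&& (1 <<< (target + x).toNat)) != 0) = true →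
    (∀ y, a ≤ y → y < x → ((seen &&& (1 <<< (target + y).toNat)) != 0) = false) →
    aLoop2 seen target a = x := by
  intro a hax hxb hpx hmin
  have hn : (x - a).toNat = (x - a).toNat := rfl
  generalize hgen : (x - a).toNat = n at hn
  clear hn
  induction n generalizing a with
  | zero =>
    have hxa : x = a := by omega
    subst hxa
    rw [aLoop2, dif_neg (by omega), if_pos hpx]
  | succ n ih =>
    rw [aLoop2, dif_neg (by omega), if_neg (by rw [hmin a le_rfl (by omega)]; simp)]
    exact ih (a + 1) (by omega) (fun y hy1 hy2 => hmin y (by omega) hy2) (by omega)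

-- ===== VERDICT (by name: the statement is the Claim_ definition above) =====
theorem minimizeTheDifference_spec : Claim_equal_minimizeTheDifference := by
  intro mat target _hdom hpre
  obtain ⟨ht0, hrows, hsum⟩ := hpre
  unfold Spec_minimizeTheDifference minimizeTheDifference minimizeTheDifference_alt
  simp only []
  -- the common abstract state
  have hrel : RelSums (mat.foldl aNewSeen 1) (mat.foldl bStep (PySem.Set.ofList [0])) :=
    relSums_foldl mat 1 _ (fun r hr => (hrows r hr).2) relSums_init
  have hrelB : RelSums (mat.foldl (fun seen row => bSpread (bRowMask row) seen seen 0) 1)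
      (mat.foldl bStep (PySem.Set.ofList [0])) :=
    relB_foldl mat 1 _ (fun r hr => (hrows r hr).2) relSums_init
  set seen := mat.foldl aNewSeen 1 with hseen
  set seenB := mat.foldl (fun seen row => bSpread (bRowMask row) seen seen 0) 1 with hseenB
  set S := mat.foldl bStep (PySem.Set.ofList [0]) with hS
  obtain ⟨hnn, hbit⟩ := hrel
  obtain ⟨-, hbitB⟩ := hrelB
  -- B's collected sums are exactly the members of S
  have hmemB : ∀ x : Int, x ∈ bCollect seenB seenB ↔ x ∈ S := by
    intro x
    rw [mem_bCollect seenB seenB x le_rfl]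
    constructor
    · rintro ⟨hx0, hb⟩
      have := (hbitB x.toNat).mp hb
      rwa [Int.toNat_of_nonneg hx0] at this
    · intro hxS
      have hx0 := hnn x hxS
      exact ⟨hx0, (hbitB x.toNat).mpr (by rwa [Int.toNat_of_nonneg hx0])⟩
  -- the minimal reachable sum is in S and bounded by Pre_
  have hmrs : (mat.map (fun r => r.foldl min (r.headD 0))).sum ∈ S := by
    have := minRowSum_mem mat (PySem.Set.ofList [0]) 0 (by simp [PySem.Set.ofList])
      (fun r hr => (hrows r hr).1)
    simpa using this
  set mrs := (mat.map (fun r => r.foldl min (r.headD 0))).sum with hmrsdef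
  -- B's value
  have hdne : (bCollect seenB seenB).map (fun s => |s - target|) ≠ [] := by
    intro h
    have := (hmemB mrs).mpr hmrs
    rw [List.map_eq_nil_iff.mp h] at this
    exact absurd this (List.not_mem_nil)
  obtain ⟨m, hm⟩ : ∃ m, PySem.List.min?
      ((bCollect seenB seenB).map (fun s => |s - target|)) (fun x => x) = some m := by
    rcases h : PySem.List.min? ((bCollect seenB seenB).map (fun s => |s - target|)) (fun x => x)
      with _ | m
    · exact absurd ((PySem.List.min?_eq_none_iff _ _).mp h) hdne
    · exact ⟨m, rfl⟩
  have hmmem := PySem.List.min?_mem hm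
  obtain ⟨s0, hs0B, hs0⟩ := List.mem_map.mp hmmem
  have hs0S : s0 ∈ S := (hmemB s0).mp hs0B
  have hm0 : 0 ≤ m := hs0 ▸ abs_nonneg _
  have hs0nn : 0 ≤ s0 := hnn s0 hs0S
  -- m is a lower bound of every reachable distance
  have hdist : ∀ s ∈ S, m ≤ |s - target| := by
    intro s hs
    exact PySem.List.min?_isMin hm _ (List.mem_map.mpr ⟨s, (hmemB s).mpr hs, rfl⟩)
  rw [hm]
  simp only [Option.getD_some]
  -- case split on where the answer lies
  by_cases hcase : m ≤ target
  · -- found by the first loop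
    rw [aLoop1_some seen target m 0 hm0 (by omega) ?_ ?_]
    · rw [bne_iff_ne, band_bor_shift_ne]
      rcases abs_cases (s0 - target) with ⟨habs, _⟩ | ⟨habs, _⟩
      · left
        have hs0eq : s0 = target + m := by omega
        refine (hbit _).mpr ?_
        rw [Int.toNat_of_nonneg (by omega), ← hs0eq]; exact hs0S
      · right
        have hs0eq : s0 = target - m := by omega
        refine (hbit _).mpr ?_
        rw [Int.toNat_of_nonneg (by omega), ← hs0eq]; exact hs0S
    · intro y hy0 hym
      by_contra hpy
      rw [Bool.not_eq_false, bne_iff_ne, band_bor_shift_ne] at hpy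
      rcases hpy with hb | hb
      · have := (hbit _).mp hb
        rw [Int.toNat_of_nonneg (by omega)] at this
        have := hdist _ this
        rw [abs_of_nonneg (by omega)] at this; omega
      · have := (hbit _).mp hb
        rw [Int.toNat_of_nonneg (by omega)] at this
        have := hdist _ this
        rw [abs_of_nonpos (by omega)] at this; omega
  · -- first loop finds nothing, second loop returns m
    push Not at hcase
    have hnone : aLoop1 seen target 0 = none := by
      refine aLoop1_none seen target 0 (fun i hi0 hi1 => ?_)
      rw [bne_eq_false_iff_eq]
      by_contra hpy
      rw [← ne_eq, band_bor_shift_ne] at hpy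
      rcases hpy with hb | hb
      · have := (hbit _).mp hb
        rw [Int.toNat_of_nonneg (by omega)] at this
        have := hdist _ this
        rw [abs_of_nonneg (by omega)] at this; omega
      · have := (hbit _).mp hb
        rw [Int.toNat_of_nonneg (by omega)] at this
        have := hdist _ this
        rw [abs_of_nonpos (by omega)] at this; omega
    rw [hnone]
    -- bound: m ≤ mrs - target ≤ 4900
    have hmrs_gt : target < mrs := by
      by_contra hle
      push Not at hle
      have := hdist _ hmrs
      have hmrs0 : 0 ≤ mrs := hnn _ hmrs
      rw [abs_of_nonpos (by omega)] at this; omega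
    have hmbound : m ≤ 70 * 70 := by
      have := hdist _ hmrs
      rw [abs_of_nonneg (by omega)] at this; omega
    -- s0 must lie above target
    have hs0eq : s0 = target + m := by
      rcases abs_cases (s0 - target) with ⟨habs, _⟩ | ⟨habs, _⟩
      · omega
      · omega
    rw [aLoop2_eq seen target m (target + 1) (by omega) (by omega) ?_ ?_]
    · rw [bne_iff_ne, band_shift_ne]
      refine (hbit _).mpr ?_
      rw [Int.toNat_of_nonneg (by omega), ← hs0eq]; exact hs0S
    · intro y hy1 hym
      by_contra hpy
      rw [Bool.not_eq_false, bne_iff_ne, band_shift_ne] at hpy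
      have := (hbit _).mp hpy
      rw [Int.toNat_of_nonneg (by omega)] at this
      have := hdist _ this
      rw [abs_of_nonneg (by omega)] at this; omega
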